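-- pv_equiv track=rewrite | github.com/PaulLeche/plomar-odoo.sh | advanced_reports/reports/report_close_box_commission.py | separate_by_cashier
-- ===== SOURCE A (Python) =====
-- from collections import defaultdict
--
-- def separate_by_cashier(total):
--     separated = []
--
--     for caja in total:
--         caja_name = caja[0]
--         transactions = caja[1]
--
--         cashier_dict = defaultdict(list)
--
--         for transaction in transactions:
--             cashier_dict[transaction['chashier']].append(transaction)
--
--         for cashier, trans_list in cashier_dict.items():
--             separated.append([caja_name, cashier, trans_list])
--
--     return separated
-- ===== SOURCE B (Python) =====
-- def separate_by_cashier(total):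
--     def groups(ts):
--         if not ts:
--             return []
--         c = ts[0]['chashier']
--         mine = [t for t in ts if t['chashier'] == c]
--         rest = [t for t in ts if t['chashier'] != c]
--         return [(c, mine)] + groups(rest)
--     return [[name, c, g] for name, ts in total for c, g in groups(ts)]
-- ===== Notes on version B (the rewrite author's own statement) =====
-- stated objective: alternative
-- what changed: Replaces the defaultdict grouping pass with a recursive partition: peel off the first transaction's cashier, filter its group out, recurse on the remainder, and flatten via a comprehension; no dict is used.
import Mathlib
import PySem

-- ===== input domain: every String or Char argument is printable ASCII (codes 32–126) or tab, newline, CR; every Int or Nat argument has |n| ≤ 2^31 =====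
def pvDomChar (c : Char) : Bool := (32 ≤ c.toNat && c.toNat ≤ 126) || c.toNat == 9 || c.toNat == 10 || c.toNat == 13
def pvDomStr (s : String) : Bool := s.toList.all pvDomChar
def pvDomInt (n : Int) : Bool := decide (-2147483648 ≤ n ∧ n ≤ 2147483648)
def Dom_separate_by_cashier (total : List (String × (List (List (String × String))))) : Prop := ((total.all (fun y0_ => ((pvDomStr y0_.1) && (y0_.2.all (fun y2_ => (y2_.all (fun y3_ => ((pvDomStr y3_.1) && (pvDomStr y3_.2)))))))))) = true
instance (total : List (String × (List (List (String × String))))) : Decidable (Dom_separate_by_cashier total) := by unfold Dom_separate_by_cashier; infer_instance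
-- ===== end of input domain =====

-- B replaces A's defaultdict grouping with a recursive partition on the first transaction's
-- cashier, flattened by a comprehension (alternative decomposition, not faster).

-- ===== PORT A =====
-- transaction['chashier']: KeyError when missing → Pre_ requires the key; .getD "" is never
-- reached under Pre_.
def pvKey (t : List (String × String)) : String :=
  ((PySem.Dict.mk t).get? "chashier").getD ""

def separate_by_cashier (total : List (String × (List (List (String × String))))) : List (String × String × (List (List (String × String)))) :=
  total.foldl (fun separated caja =>
    let caja_name := caja.1
    let transactions := caja.2
    let cashier_dict := transactions.foldl
      (fun d t => d.modify (pvKey t) [] (fun l => l ++ [t])) PySem.Dict.empty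
    cashier_dict.items.foldl (fun sep p => sep ++ [(caja_name, p.1, p.2)]) separated) []

-- ===== PORT B =====
-- groups(ts): partition off the first transaction's cashier, recurse on the rest.
def pvGroups : List (List (String × String)) → List (String × List (List (String × String)))
  | [] => []
  | t :: ts =>
    (pvKey t, (t :: ts).filter (fun u => pvKey u == pvKey t)) ::
      pvGroups ((t :: ts).filter (fun u => !(pvKey u == pvKey t)))
termination_by ts => ts.length
decreasing_by
  simp only [List.filter_cons, beq_self_eq_true, Bool.not_true, Bool.false_eq_true, if_false]
  exact Nat.lt_succ_of_le (List.length_filter_le _ _)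

def separate_by_cashier_alt (total : List (String × (List (List (String × String))))) : List (String × String × (List (List (String × String)))) :=
  total.flatMap (fun caja => (pvGroups caja.2).map (fun p => (caja.1, p.1, p.2)))

-- ===== PRECONDITION & SPEC =====
-- Pre_ excludes inputs where some transaction dict lacks the key 'chashier': there both A and B
-- raise KeyError.
def Pre_separate_by_cashier (total : List (String × (List (List (String × String))))) : Prop :=
  ∀ caja ∈ total, ∀ t ∈ caja.2, (PySem.Dict.mk t).contains "chashier" = true
instance (total : List (String × (List (List (String × String))))) : Decidable (Pre_separate_by_cashier total) := by unfold Pre_separate_by_cashier; infer_instance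

def pvWitness_separate_by_cashier : (List (String × (List (List (String × String))))) :=
  [("box1", [[("chashier", "ann"), ("v", "1")], [("chashier", "bob")], [("chashier", "ann"), ("v", "2")]]), ("box2", [])]

def Spec_separate_by_cashier (total : List (String × (List (List (String × String))))) (out : List (String × String × (List (List (String × String))))) : Prop := out = separate_by_cashier_alt total
instance (total : List (String × (List (List (String × String))))) (out : List (String × String × (List (List (String × String))))) : Decidable (Spec_separate_by_cashier total out) := by unfold Spec_separate_by_cashier; infer_instance

-- ===== CLAIM (what is proved, stated in full; the proofs are below) =====
def Claim_equal_separate_by_cashier : Prop := ∀ (total : List (String × (List (List (String × String))))), Dom_separate_by_cashier total → Pre_separate_by_cashier total → Spec_separate_by_cashier total (separate_by_cashier total)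

-- ===== LEMMAS AND PROOFS =====

-- Folding Set.add from a seed s only appends the keys not already in s, in first-seen order.
theorem pv_foldl_add_seed : ∀ (ks : List String) (s : List String),
    ks.foldl PySem.Set.add s
      = s ++ (ks.filter (fun k => !(s.contains k))).foldl PySem.Set.add [] := by
  intro ks
  induction hlen : ks.length using Nat.strong_induction_on generalizing ks with
  | _ n ih =>
    intro s
    match ks, hlen with
    | [], _ => simp
    | k :: t, hlen =>
      have hlt : t.length < n := by simp only [List.length_cons] at hlen; omega
      by_cases hc : s.contains k
      · have hm : k ∈ s := by simpa using hc
        have ha : PySem.Set.add s k = s := by simp [PySem.Set.add, hm]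
        simp only [List.foldl_cons, List.filter_cons, hc, Bool.not_true, Bool.false_eq_true,
          if_false, ha]
        exact ih t.length hlt t rfl s
      · have hm : k ∉ s := by simpa using hc
        have ha : PySem.Set.add s k = s ++ [k] := by simp [PySem.Set.add, hm]
        have hb : PySem.Set.add ([] : List String) k = [k] := by simp [PySem.Set.add]
        simp only [List.foldl_cons, List.filter_cons, hc, Bool.not_false, if_true, ha, hb]
        rw [ih t.length hlt t rfl (s ++ [k]),
          ih (t.filter (fun k' => !s.contains k')).length
            (lt_of_le_of_lt (List.length_filter_le _ _) hlt)
            (t.filter (fun k' => !s.contains k')) rfl [k],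
          List.filter_filter]
        have hpred : (fun k' => !(s ++ [k]).contains k')
            = (fun k' => !([k].contains k') && !(s.contains k')) := by
          funext x
          by_cases h1 : x = k <;> by_cases h2 : x ∈ s <;>
            simp [h1, h2]
        rw [hpred, List.append_assoc]


-- A's grouping dict items, per box, equal the first-seen order paired with stable filters.
theorem pv_items_eq (ts : List (List (String × String))) :
    (ts.foldl (fun d t => d.modify (pvKey t) [] (fun l => l ++ [t])) PySem.Dict.empty).items
      = (ts.foldl (fun s t => PySem.Set.add s (pvKey t)) []).map
          (fun c => (c, ts.filter (fun t => pvKey t == c))) := by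
  have hfold : ts.foldl (fun d t => d.modify (pvKey t) [] (fun l => l ++ [t])) PySem.Dict.empty
      = (ts.map (fun t => (pvKey t, t))).foldl
          (fun d p => d.modify p.1 [] (fun l => l ++ [p.2])) PySem.Dict.empty := by
    rw [List.foldl_map]
  have hnd : (ts.foldl (fun d t => d.modify (pvKey t) [] (fun l => l ++ [t]))
      PySem.Dict.empty).keys.Nodup :=
    PySem.Dict.nodup_keys_foldl_modify_key ts pvKey [] (fun _ t l => l ++ [t]) PySem.Dict.empty
      (by simp [PySem.Dict.keys_empty])
  have hkeys : (ts.foldl (fun d t => d.modify (pvKey t) [] (fun l => l ++ [t]))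
      PySem.Dict.empty).keys = ts.foldl (fun s t => PySem.Set.add s (pvKey t)) [] := by
    rw [PySem.Dict.keys_foldl_modify_key, ← PySem.Set.update_map_eq_foldl_add,
      PySem.Dict.keys_empty]
  rw [PySem.Dict.items_eq_map_keys _ hnd ([] : List (List (String × String))), hkeys]
  apply List.map_congr_left
  intro c _
  congr 1
  rw [hfold, PySem.Dict.getD_foldl_modify_append, PySem.Dict.getD_empty, List.nil_append,
    List.filter_map]
  simp [List.map_map, Function.comp_def]

-- B's recursive partition produces exactly that first-seen-order grouping.
theorem pv_groups_eq (ts : List (List (String × String))) :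
    pvGroups ts
      = (ts.foldl (fun s t => PySem.Set.add s (pvKey t)) []).map
          (fun c => (c, ts.filter (fun t => pvKey t == c))) := by
  induction ts using pvGroups.induct with
  | case1 => simp [pvGroups]
  | case2 t ts ih =>
    have hrest : (t :: ts).filter (fun u => !(pvKey u == pvKey t))
        = ts.filter (fun u => !(pvKey u == pvKey t)) := by
      simp
    -- first-seen order of t :: ts = pvKey t :: first-seen order of the rest
    have hord : (t :: ts).foldl (fun s u => PySem.Set.add s (pvKey u)) []
        = pvKey t :: (ts.filter (fun u => !(pvKey u == pvKey t))).foldl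
            (fun s u => PySem.Set.add s (pvKey u)) [] := by
      rw [List.foldl_cons]
      have hb : PySem.Set.add ([] : List String) (pvKey t) = [pvKey t] := by
        simp [PySem.Set.add]
      rw [hb, ← List.foldl_map, pv_foldl_add_seed]
      have hp : (fun k => !([pvKey t].contains k)) = (fun k => !(k == pvKey t)) := by
        funext x; by_cases h : x = pvKey t <;> simp [h]
      rw [hp, List.filter_map, List.foldl_map]
      simp [Function.comp_def]
    rw [hrest] at ih
    rw [pvGroups, hrest, hord, List.map_cons, ih]
    congr 1
    apply List.map_congr_left
    intro c hc
    have hmem : c ∈ (ts.filter (fun u => !(pvKey u == pvKey t))).map pvKey := by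
      rw [← List.foldl_map, ← PySem.Set.ofList_eq_foldl] at hc
      exact (PySem.Set.mem_ofList _ _).mp hc
    obtain ⟨u, hu, hku⟩ := List.mem_map.mp hmem
    have hne : c ≠ pvKey t := by
      have hf := List.of_mem_filter hu
      simp only [Bool.not_eq_true'] at hf
      rw [← hku]; exact fun h => by simp [h] at hf
    congr 1
    rw [List.filter_filter, List.filter_cons]
    have hhead : (pvKey t == c) = false := beq_eq_false_iff_ne.mpr (Ne.symm hne)
    rw [hhead]
    simp only [Bool.false_eq_true, if_false]
    apply List.filter_congr
    intro u _
    by_cases h : pvKey u = c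
    · simp [h, hne]
    · simp [h]

-- ===== VERDICT (by name: the statement is the Claim_ definition above) =====
theorem separate_by_cashier_spec : Claim_equal_separate_by_cashier := by
  intro total _ _
  unfold Spec_separate_by_cashier separate_by_cashier separate_by_cashier_alt
  calc total.foldl (fun separated caja =>
        ((caja.2.foldl (fun d t => d.modify (pvKey t) [] (fun l => l ++ [t]))
          PySem.Dict.empty).items).foldl
            (fun sep p => sep ++ [(caja.1, p.1, p.2)]) separated) []
      = total.foldl (fun separated caja =>
          separated ++ (pvGroups caja.2).map (fun p => (caja.1, p.1, p.2))) [] := by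
        apply List.foldl_ext
        intro sep caja _
        rw [PySem.List.foldl_append_singleton_eq_map, pv_items_eq, ← pv_groups_eq]
    _ = total.flatMap (fun caja => (pvGroups caja.2).map (fun p => (caja.1, p.1, p.2))) := by
        rw [PySem.List.foldl_append_eq_flatMap, List.nil_append]
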